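-- pv_equiv track=rewrite | github.com/Ross0907/Vivado-waveform-extractor | vcd_converter.py | build_timeline
-- ===== SOURCE A (Python) =====
-- def build_timeline(signals, changes):
--     """Build complete timeline with all signal values at each timestamp."""
--
--     current_values = {vid: '0' for vid in signals}
--     timestamps = sorted(set(t for t, _, _ in changes))
--
--     # Group changes by time
--     by_time = {}
--     for t, vid, val in changes:
--         if t not in by_time:
--             by_time[t] = {}
--         by_time[t][vid] = val
--
--     # Build rows
--     rows = []
--     for t in timestamps:
--         if t in by_time:
--             current_values.update(by_time[t])
--         rows.append((t, dict(current_values)))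
--
--     return rows
-- ===== SOURCE B (Python) =====
-- def build_timeline(signals, changes):
--     """Build complete timeline with all signal values at each timestamp."""
--     current = {vid: '0' for vid in signals}
--     rows = []
--     prev_t = None
--     for t, vid, val in sorted(changes, key=lambda c: c[0]):
--         if prev_t is not None and t != prev_t:
--             rows.append((prev_t, dict(current)))
--         current[vid] = val
--         prev_t = t
--     if prev_t is not None:
--         rows.append((prev_t, dict(current)))
--     return rows
-- ===== Notes on version B (the rewrite author's own statement) =====
-- stated objective: alternative
-- what changed: B replaces A's three staged passes (by_time index of per-timestamp dicts, sorted distinct timestamps, then a row loop doing dict.update) with ONE pass over the change list stably sorted by timestamp, flushing a snapshot row whenever the timestamp advances and once at the end.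
import Mathlib
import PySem

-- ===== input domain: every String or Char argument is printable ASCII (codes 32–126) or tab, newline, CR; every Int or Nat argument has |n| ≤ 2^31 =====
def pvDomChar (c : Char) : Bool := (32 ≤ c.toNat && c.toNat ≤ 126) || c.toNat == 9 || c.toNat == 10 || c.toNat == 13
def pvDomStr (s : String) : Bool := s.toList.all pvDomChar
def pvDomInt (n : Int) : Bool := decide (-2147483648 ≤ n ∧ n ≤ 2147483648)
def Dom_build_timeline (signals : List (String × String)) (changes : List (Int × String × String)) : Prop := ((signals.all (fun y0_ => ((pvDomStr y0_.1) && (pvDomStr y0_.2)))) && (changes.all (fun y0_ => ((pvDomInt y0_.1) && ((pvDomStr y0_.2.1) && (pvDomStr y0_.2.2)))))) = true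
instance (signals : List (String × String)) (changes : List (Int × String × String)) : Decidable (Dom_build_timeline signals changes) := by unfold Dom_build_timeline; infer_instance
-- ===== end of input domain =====

-- B replaces A's staged passes (by_time index, sorted distinct timestamps, row loop with dict.update)
-- by one pass over the change list stably sorted by timestamp, flushing a row at each timestamp change
-- (objective: alternative decomposition; not claimed faster).

-- ===== PORT A =====
def build_timeline (signals : List (String × String)) (changes : List (Int × String × String)) : List (Int × (List (String × String))) :=
  -- current_values = {vid: '0' for vid in signals}   (signals is a dict; iterating yields its keys)
  let current0 : PySem.Dict String String :=
    signals.foldl (fun d p => d.insert p.1 "0") PySem.Dict.empty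
  -- timestamps = sorted(set(t for t, _, _ in changes))
  let timestamps : List Int :=
    PySem.List.sorted (PySem.Set.ofList (changes.map (fun c => c.1))) (fun x => x) false
  -- if t not in by_time: by_time[t] = {};  by_time[t][vid] = val
  let by_time : PySem.Dict Int (PySem.Dict String String) :=
    changes.foldl (fun bt c => bt.modify c.1 PySem.Dict.empty (fun d => d.insert c.2.1 c.2.2))
      PySem.Dict.empty
  -- for t in timestamps: if t in by_time: current_values.update(by_time[t]); rows.append((t, dict(current_values)))
  let res := timestamps.foldl
    (fun (st : PySem.Dict String String × List (Int × List (String × String))) t =>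
      let cv := if by_time.contains t then st.1.update (by_time.getD t PySem.Dict.empty).items else st.1
      (cv, st.2 ++ [(t, cv.items)]))
    (current0, [])
  res.2

-- ===== PORT B =====
def build_timeline_alt (signals : List (String × String)) (changes : List (Int × String × String)) : List (Int × (List (String × String))) :=
  -- current = {vid: '0' for vid in signals}; rows = []; prev_t = None
  -- for t, vid, val in sorted(changes, key=lambda c: c[0]): flush on a new t, then current[vid] = val
  let st := (PySem.List.sorted changes (fun c => c.1) false).foldl
    (fun (st : PySem.Dict String String × Option Int × List (Int × List (String × String))) c =>
      let rows := match st.2.1 with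
        | some p => if c.1 ≠ p then st.2.2 ++ [(p, st.1.items)] else st.2.2
        | none => st.2.2
      (st.1.insert c.2.1 c.2.2, some c.1, rows))
    (signals.foldl (fun d p => d.insert p.1 "0") PySem.Dict.empty, none, [])
  -- if prev_t is not None: rows.append((prev_t, dict(current)))
  match st.2.1 with
  | some p => st.2.2 ++ [(p, st.1.items)]
  | none => st.2.2

-- ===== PRECONDITION & SPEC =====
def Spec_build_timeline (signals : List (String × String)) (changes : List (Int × String × String)) (out : List (Int × (List (String × String)))) : Prop := out = build_timeline_alt signals changes
instance (signals : List (String × String)) (changes : List (Int × String × String)) (out : List (Int × (List (String × String)))) : Decidable (Spec_build_timeline signals changes out) := by unfold Spec_build_timeline; infer_instance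

-- ===== CLAIM (what is proved, stated in full; the proofs are below) =====
def Claim_equal_build_timeline : Prop := ∀ (signals : List (String × String)) (changes : List (Int × String × String)), Dom_build_timeline signals changes → Spec_build_timeline signals changes (build_timeline signals changes)

-- ===== LEMMAS AND PROOFS =====

-- ---- proof-only abbreviations ----

-- the changes carrying timestamp t, in source order
def pvGroup (changes : List (Int × String × String)) (t : Int) : List (Int × String × String) :=
  changes.filter (fun c => c.1 == t)

-- sorted distinct timestamps
def pvTs (changes : List (Int × String × String)) : List Int :=
  PySem.List.sorted (PySem.Set.ofList (changes.map (fun c => c.1))) (fun x => x) false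

-- apply one change to the value dict
def pvIns (cv : PySem.Dict String String) (c : Int × String × String) : PySem.Dict String String :=
  cv.insert c.2.1 c.2.2

-- B's loop body and its final flush
def pvStep (st : PySem.Dict String String × Option Int × List (Int × List (String × String)))
    (c : Int × String × String) :
    PySem.Dict String String × Option Int × List (Int × List (String × String)) :=
  let rows := match st.2.1 with
    | some p => if c.1 ≠ p then st.2.2 ++ [(p, st.1.items)] else st.2.2
    | none => st.2.2
  (st.1.insert c.2.1 c.2.2, some c.1, rows)

def pvFinish (st : PySem.Dict String String × Option Int × List (Int × List (String × String))) :
    List (Int × List (String × String)) :=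
  match st.2.1 with
  | some p => st.2.2 ++ [(p, st.1.items)]
  | none => st.2.2

-- the rows A produces from value dict cv over the remaining timestamps
def pvARows (changes : List (Int × String × String)) :
    PySem.Dict String String → List Int → List (Int × List (String × String))
  | _, [] => []
  | cv, t :: r =>
    let cv' := (pvGroup changes t).foldl pvIns cv
    (t, cv'.items) :: pvARows changes cv' r

-- ---- dict lemmas (A's update-with-group = replaying the group's inserts) ----

theorem pv_insert_comm_of_contains {κ ν : Type} [BEq κ] [LawfulBEq κ]
    (c : PySem.Dict κ ν) {p k : κ} (q v : ν) (hpk : p ≠ k) (hk : c.contains k = true) :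
    (c.insert p q).insert k v = (c.insert k v).insert p q := by
  apply PySem.Dict.ext
  by_cases hp : c.contains p = true
  · have h1 : (c.insert p q).contains k = true := by
      rw [PySem.Dict.contains_insert]; simp [hk]
    have h2 : (c.insert k v).contains p = true := by
      rw [PySem.Dict.contains_insert]; simp [hp]
    rw [PySem.Dict.items_insert_of_contains _ _ h1, PySem.Dict.items_insert_of_contains _ _ hp,
        PySem.Dict.items_insert_of_contains _ _ h2, PySem.Dict.items_insert_of_contains _ _ hk]
    simp only [List.map_map]
    apply List.map_congr_left
    intro x _
    by_cases hxp : x.1 = p <;> by_cases hxk : x.1 = k <;>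
      simp_all [Function.comp, Ne.symm hpk]
  · have hp' : c.contains p = false := by simpa using hp
    have h1 : (c.insert p q).contains k = true := by
      rw [PySem.Dict.contains_insert]; simp [hk]
    have h2 : (c.insert k v).contains p = false := by
      rw [PySem.Dict.contains_insert]; simp [hp', hpk]
    rw [PySem.Dict.items_insert_of_contains _ _ h1,
        PySem.Dict.items_insert_of_not_contains _ _ hp',
        PySem.Dict.items_insert_of_not_contains _ _ h2,
        PySem.Dict.items_insert_of_contains _ _ hk]
    simp [hpk]

theorem pv_foldl_insert_out {κ ν : Type} [BEq κ] [LawfulBEq κ]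
    (l : List (κ × ν)) (k : κ) (v : ν) (hl : ∀ p ∈ l, p.1 ≠ k) :
    ∀ c : PySem.Dict κ ν, c.contains k = true →
      l.foldl (fun d p => d.insert p.1 p.2) (c.insert k v)
        = (l.foldl (fun d p => d.insert p.1 p.2) c).insert k v := by
  induction l with
  | nil => intro c _; rfl
  | cons p l ih =>
    intro c hc
    have hpk : p.1 ≠ k := hl p (List.mem_cons_self ..)
    simp only [List.foldl_cons]
    rw [← pv_insert_comm_of_contains c p.2 v hpk hc]
    exact ih (fun x hx => hl x (List.mem_cons_of_mem _ hx)) _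
      (by rw [PySem.Dict.contains_insert]; simp [hc])

theorem pv_update_insert {κ ν : Type} [BEq κ] [LawfulBEq κ]
    (d : PySem.Dict κ ν) (k : κ) (v : ν) (hnd : d.keys.Nodup) (cv : PySem.Dict κ ν) :
    (d.insert k v).items.foldl (fun d p => d.insert p.1 p.2) cv
      = (d.items.foldl (fun d p => d.insert p.1 p.2) cv).insert k v := by
  by_cases hc : d.contains k = true
  · have hkmem : k ∈ d.keys := (PySem.Dict.contains_iff_mem_keys d k).1 hc
    have : ∃ w, (k, w) ∈ d.items := by
      simp only [PySem.Dict.keys, List.mem_map] at hkmem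
      obtain ⟨x, hx, hxk⟩ := hkmem
      exact ⟨x.2, by rwa [show (k, x.2) = x by cases x; simp_all]⟩
    obtain ⟨w, hw⟩ := this
    obtain ⟨l1, l2, hitems⟩ := List.append_of_mem hw
    have hnd' := hnd
    simp only [PySem.Dict.keys, hitems, List.map_append, List.map_cons] at hnd'
    have hdisj := (List.nodup_append.1 hnd').2.2
    have h1 : ∀ x ∈ l1, x.1 ≠ k := by
      intro x hx h
      exact hdisj x.1 (List.mem_map_of_mem hx) k (List.mem_cons_self ..) h
    have h2 : ∀ x ∈ l2, x.1 ≠ k := by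
      have := ((List.nodup_append.1 hnd').2.1)
      simp only [List.nodup_cons] at this
      intro x hx h
      exact this.1 (h ▸ List.mem_map_of_mem hx)
    rw [PySem.Dict.items_insert_of_contains _ _ hc, hitems]
    have hmap1 : l1.map (fun p => if (p.1 == k) = true then (k, v) else p) = l1 := by
      conv_rhs => rw [← List.map_id l1]
      apply List.map_congr_left; intro x hx; simp [h1 x hx]
    have hmap2 : l2.map (fun p => if (p.1 == k) = true then (k, v) else p) = l2 := by
      conv_rhs => rw [← List.map_id l2]
      apply List.map_congr_left; intro x hx; simp [h2 x hx]
    rw [List.map_append, List.map_cons, hmap1, hmap2]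
    simp only [beq_self_eq_true, if_true, List.foldl_append, List.foldl_cons]
    rw [← PySem.Dict.insert_insert_self _ k w v]
    exact pv_foldl_insert_out l2 k v h2 _ (PySem.Dict.contains_insert_self ..)
  · have hc' : d.contains k = false := by simpa using hc
    rw [PySem.Dict.items_insert_of_not_contains _ _ hc', List.foldl_append]
    rfl

theorem pv_update_compress {κ ν : Type} [BEq κ] [LawfulBEq κ]
    (l : List (κ × ν)) (cv : PySem.Dict κ ν) :
    (l.foldl (fun d p => d.insert p.1 p.2) PySem.Dict.empty).items.foldl
        (fun d p => d.insert p.1 p.2) cv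
      = l.foldl (fun d p => d.insert p.1 p.2) cv := by
  induction l using List.reverseRecOn generalizing cv with
  | nil => rfl
  | append_singleton l p ih =>
    have hnd : (l.foldl (fun d p => d.insert p.1 p.2) PySem.Dict.empty).keys.Nodup :=
      PySem.Dict.nodup_keys_foldl_insert_key l (fun p => p.1) (fun _ p => p.2)
        PySem.Dict.empty (by simp [PySem.Dict.keys_empty])
    simp only [List.foldl_append, List.foldl_cons, List.foldl_nil]
    rw [pv_update_insert _ p.1 p.2 hnd cv, ih cv]

theorem pv_by_time_getD (changes : List (Int × String × String)) (t : Int) :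
    ∀ bt0 : PySem.Dict Int (PySem.Dict String String),
      (changes.foldl (fun bt c => bt.modify c.1 PySem.Dict.empty (fun d => d.insert c.2.1 c.2.2)) bt0).getD t PySem.Dict.empty
        = (changes.filter (fun c => c.1 == t)).foldl (fun d c => d.insert c.2.1 c.2.2) (bt0.getD t PySem.Dict.empty) := by
  induction changes with
  | nil => intro bt0; rfl
  | cons c l ih =>
    intro bt0
    simp only [List.foldl_cons, List.filter_cons]
    by_cases hct : c.1 = t
    · simp only [hct, beq_self_eq_true, if_true, List.foldl_cons]
      rw [ih, PySem.Dict.getD_modify]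
      simp
    · have : (c.1 == t) = false := by simp [hct]
      simp only [this]
      rw [ih, PySem.Dict.getD_modify]
      simp [Ne.symm hct]

theorem pv_by_time_contains (changes : List (Int × String × String)) (t : Int)
    (ht : t ∈ changes.map (fun c => c.1)) :
    (changes.foldl (fun bt c => bt.modify c.1 PySem.Dict.empty (fun d => d.insert c.2.1 c.2.2)) PySem.Dict.empty).contains t = true := by
  rw [PySem.Dict.contains_iff_mem_keys,
      PySem.Dict.keys_foldl_modify_key changes (fun c => c.1) PySem.Dict.empty
        (fun _ c d => d.insert c.2.1 c.2.2) PySem.Dict.empty,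
      PySem.Dict.keys_empty]
  exact (PySem.Set.mem_update [] _ t).2 (Or.inr ht)

-- A's step at a timestamp that occurs in changes replays that group's inserts
theorem pv_A_step (changes : List (Int × String × String)) (t : Int)
    (ht : t ∈ changes.map (fun c => c.1)) (acc : PySem.Dict String String) :
    (let by_time := changes.foldl (fun bt c => bt.modify c.1 PySem.Dict.empty (fun d => d.insert c.2.1 c.2.2)) PySem.Dict.empty
     if by_time.contains t then acc.update (by_time.getD t PySem.Dict.empty).items else acc)
      = (pvGroup changes t).foldl pvIns acc := by
  have hcont := pv_by_time_contains changes t ht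
  simp only [hcont, if_true]
  have hmapfold : ∀ (l : List (Int × String × String)) (d : PySem.Dict String String),
      (l.map (fun c => c.2)).foldl (fun d p => d.insert p.1 p.2) d
        = l.foldl (fun d c => d.insert c.2.1 c.2.2) d := by
    intro l d; rw [List.foldl_map]
  rw [PySem.Dict.update, pv_by_time_getD changes t PySem.Dict.empty, PySem.Dict.getD_empty,
      ← hmapfold, pv_update_compress, hmapfold]
  rfl

theorem pv_insertBy_append {α : Type} (before : α → α → Bool) (x : α) (A B : List α)
    (h : ∀ a ∈ A, before x a = false) :
    PySem.List.insertBy before x (A ++ B) = A ++ PySem.List.insertBy before x B := by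
  induction A with
  | nil => rfl
  | cons a A ih =>
    simp only [List.cons_append, PySem.List.insertBy, h a (List.mem_cons_self ..),
      Bool.false_eq_true, if_false]
    rw [ih (fun x hx => h x (List.mem_cons_of_mem _ hx))]

theorem pv_group_fst {changes : List (Int × String × String)} {t : Int}
    {c : Int × String × String} (hc : c ∈ pvGroup changes t) : c.1 = t := by
  have := (List.mem_filter.1 hc).2
  simpa using this

theorem pv_group_ne_nil {changes : List (Int × String × String)} {t : Int}
    (ht : t ∈ changes.map (fun c => c.1)) : pvGroup changes t ≠ [] := by
  intro hnil
  obtain ⟨c, hcmem, hct⟩ := List.mem_map.1 ht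
  have : c ∈ pvGroup changes t := List.mem_filter.2 ⟨hcmem, by simp [hct]⟩
  simp [hnil] at this

theorem pv_mem_pvTs {changes : List (Int × String × String)} {t : Int} :
    t ∈ pvTs changes ↔ t ∈ changes.map (fun c => c.1) := by
  unfold pvTs
  rw [PySem.List.mem_sorted, PySem.Set.mem_ofList]

-- split a strictly increasing list around a member
theorem pv_split_mem {l : List Int} {t0 : Int} (hp : l.Pairwise (· < ·)) (hm : t0 ∈ l) :
    ∃ A B, l = A ++ t0 :: B ∧ (∀ a ∈ A, a < t0) ∧ (∀ b ∈ B, t0 < b) := by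
  obtain ⟨A, B, rfl⟩ := List.append_of_mem hm
  refine ⟨A, B, rfl, ?_, ?_⟩
  · intro a ha
    exact (List.pairwise_append.1 hp).2.2 a ha t0 (List.mem_cons_self ..)
  · intro b hb
    exact (List.pairwise_cons.1 (List.pairwise_append.1 hp).2.1).1 b hb

-- split a strictly increasing list around a non-member
theorem pv_split_not_mem (t0 : Int) :
    ∀ (l : List Int), l.Pairwise (· < ·) → t0 ∉ l →
    ∃ A B, l = A ++ B ∧ (∀ a ∈ A, a < t0) ∧ (∀ b ∈ B, t0 < b) := by
  intro l
  induction l with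
  | nil => intro _ _; exact ⟨[], [], rfl, by simp, by simp⟩
  | cons a l ih =>
    intro hp hm
    by_cases ha : a < t0
    · obtain ⟨A, B, heq, hA, hB⟩ := ih (List.pairwise_cons.1 hp).2
        (fun h => hm (List.mem_cons_of_mem _ h))
      exact ⟨a :: A, B, by simp [heq], by
        intro x hx
        rcases List.mem_cons.1 hx with rfl | hx
        · exact ha
        · exact hA x hx, hB⟩
    · have hat : t0 < a := by
        rcases lt_trichotomy a t0 with h | h | h
        · exact absurd h ha
        · exact absurd (h ▸ List.mem_cons_self ..) hm
        · exact h
      refine ⟨[], a :: l, rfl, by simp, ?_⟩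
      intro b hb
      rcases List.mem_cons.1 hb with rfl | hb
      · exact hat
      · exact lt_trans hat ((List.pairwise_cons.1 hp).1 b hb)

-- A's row loop in recursive form
theorem pv_A_rows (changes : List (Int × String × String)) :
    ∀ (ts : List Int), (∀ t ∈ ts, t ∈ changes.map (fun c => c.1)) →
    ∀ (cv : PySem.Dict String String) (rows : List (Int × List (String × String))),
      (ts.foldl
        (fun (st : PySem.Dict String String × List (Int × List (String × String))) t =>
          let cv := if (changes.foldl (fun bt c => bt.modify c.1 PySem.Dict.empty (fun d => d.insert c.2.1 c.2.2)) PySem.Dict.empty).contains t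
                    then st.1.update ((changes.foldl (fun bt c => bt.modify c.1 PySem.Dict.empty (fun d => d.insert c.2.1 c.2.2)) PySem.Dict.empty).getD t PySem.Dict.empty).items
                    else st.1
          (cv, st.2 ++ [(t, cv.items)])) (cv, rows)).2
      = rows ++ pvARows changes cv ts := by
  intro ts
  induction ts with
  | nil => intro _ cv rows; simp [pvARows]
  | cons t r ih =>
    intro hmem cv rows
    simp only [List.foldl_cons]
    have hstep := pv_A_step changes t (hmem t (List.mem_cons_self ..)) cv
    simp only at hstep
    rw [hstep]
    rw [ih (fun x hx => hmem x (List.mem_cons_of_mem _ hx))]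
    simp [pvARows]

-- Set.ofList over an appended element
theorem pv_ofList_append (xs : List Int) (a : Int) :
    PySem.Set.ofList (xs ++ [a]) = if a ∈ xs then PySem.Set.ofList xs else PySem.Set.ofList xs ++ [a] := by
  rw [PySem.Set.ofList_eq_foldl, List.foldl_append, ← PySem.Set.ofList_eq_foldl]
  simp only [List.foldl_cons, List.foldl_nil, PySem.Set.add]
  by_cases h : a ∈ xs
  · have hc : (PySem.Set.ofList xs).contains a = true := by
      simp [PySem.Set.contains, PySem.Set.mem_ofList, h]
    simp [h]
  · have hc : (PySem.Set.ofList xs).contains a = false := by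
      simp [PySem.Set.contains, PySem.Set.mem_ofList, h]
    simp [h]

-- sorting an appended element = inserting it into the sorted list
theorem pv_sorted_append_id (S : List Int) (a : Int) :
    PySem.List.sorted (S ++ [a]) (fun x => x) false
      = PySem.List.insertBy (fun p q => decide (p < q)) a (PySem.List.sorted S (fun x => x) false) := by
  rw [PySem.List.sorted_eq_foldl_insertBy, PySem.List.sorted_eq_foldl_insertBy, List.foldl_append]
  rfl

theorem pv_sorted_append_fst (l : List (Int × String × String)) (x : Int × String × String) :
    PySem.List.sorted (l ++ [x]) (fun c => c.1) false
      = PySem.List.insertBy (fun a b => decide (a.1 < b.1)) x (PySem.List.sorted l (fun c => c.1) false) := by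
  rw [PySem.List.sorted_eq_foldl_insertBy, PySem.List.sorted_eq_foldl_insertBy, List.foldl_append]
  rfl

-- the stable sort of the changes by timestamp is the concatenation of the groups,
-- one per sorted distinct timestamp
theorem pv_grouped (changes : List (Int × String × String)) :
    PySem.List.sorted changes (fun c => c.1) false
      = (pvTs changes).flatMap (pvGroup changes) := by
  induction changes using List.reverseRecOn with
  | nil => rfl
  | append_singleton l x ih =>
    rw [pv_sorted_append_fst, ih]
    have hgroup : ∀ t, pvGroup (l ++ [x]) t = pvGroup l t ++ if x.1 == t then [x] else [] := by
      intro t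
      simp [pvGroup, List.filter_append, List.filter_cons]
    have hpw : (pvTs l).Pairwise (· < ·) :=
      PySem.List.sorted_ofList_pairwise_lt (l.map (fun c => c.1))
    have hmapfst : (l ++ [x]).map (fun c => c.1) = l.map (fun c => c.1) ++ [x.1] := by simp
    by_cases hmem : x.1 ∈ l.map (fun c => c.1)
    · -- x's timestamp already occurs: the timestamp list is unchanged, x joins its group
      have hts : pvTs (l ++ [x]) = pvTs l := by
        unfold pvTs
        rw [hmapfst, pv_ofList_append, if_pos hmem]
      obtain ⟨A, B, hAB, hA, hB⟩ := pv_split_mem hpw (pv_mem_pvTs.2 hmem)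
      rw [hts, hAB]
      simp only [List.flatMap_append, List.flatMap_cons]
      have hgA : A.flatMap (pvGroup (l ++ [x])) = A.flatMap (pvGroup l) :=
        List.flatMap_congr (fun a ha => by
          rw [hgroup a]
          simp [show (x.1 == a) = false by simp [(hA a ha).ne']])
      have hgB : B.flatMap (pvGroup (l ++ [x])) = B.flatMap (pvGroup l) :=
        List.flatMap_congr (fun b hb => by
          rw [hgroup b]
          simp [show (x.1 == b) = false by simp [(hB b hb).ne]])
      have hgt0 : pvGroup (l ++ [x]) x.1 = pvGroup l x.1 ++ [x] := by
        rw [hgroup]; simp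
      rw [hgA, hgB, hgt0]
      have hfalse : ∀ c ∈ A.flatMap (pvGroup l) ++ pvGroup l x.1,
          (fun (a b : Int × String × String) => decide (a.1 < b.1)) x c = false := by
        intro c hc
        rcases List.mem_append.1 hc with hc | hc
        · obtain ⟨a, ha, hcg⟩ := List.mem_flatMap.1 hc
          have hfst := pv_group_fst hcg
          simp [hfst, not_lt.2 (le_of_lt (hA a ha))]
        · have hfst := pv_group_fst hc
          simp [hfst]
      rw [← List.append_assoc, pv_insertBy_append _ x _ _ hfalse]
      cases B with
      | nil => simp [PySem.List.insertBy]
      | cons b B' =>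
        have hbmem : b ∈ l.map (fun c => c.1) :=
          pv_mem_pvTs.1 (by
            rw [hAB]
            exact List.mem_append.2 (Or.inr (List.mem_cons_of_mem _ (List.mem_cons_self ..))))
        rcases hGb : pvGroup l b with _ | ⟨c0, G'⟩
        · exact absurd hGb (pv_group_ne_nil hbmem)
        · have hc0 : c0.1 = b := pv_group_fst (by rw [hGb]; exact List.mem_cons_self ..)
          have hx1b : (decide (x.1 < c0.1)) = true := by
            simp [hc0]
            exact hB b (List.mem_cons_self ..)
          simp only [List.flatMap_cons, hGb, List.cons_append]
          simp [PySem.List.insertBy, hx1b, List.append_assoc]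
    · -- new timestamp: it is inserted into the timestamp list and forms its own group [x]
      have hts : pvTs (l ++ [x]) = PySem.List.insertBy (fun p q => decide (p < q)) x.1 (pvTs l) := by
        unfold pvTs
        rw [hmapfst, pv_ofList_append, if_neg hmem, pv_sorted_append_id]
      have hg0 : pvGroup l x.1 = [] := by
        rw [pvGroup, List.filter_eq_nil_iff]
        intro c hcmem
        simp only [beq_iff_eq]
        intro hceq
        exact hmem (List.mem_map.2 ⟨c, hcmem, hceq⟩)
      have hgt0 : pvGroup (l ++ [x]) x.1 = [x] := by
        rw [hgroup, hg0]; simp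
      obtain ⟨A, B, hAB, hA, hB⟩ :=
        pv_split_not_mem x.1 (pvTs l) hpw (fun h => hmem (pv_mem_pvTs.1 h))
      have htsplit : PySem.List.insertBy (fun p q => decide (p < q)) x.1 (pvTs l)
          = A ++ x.1 :: B := by
        rw [hAB, pv_insertBy_append _ x.1 A B (fun a ha => by simp [not_lt.2 (le_of_lt (hA a ha))])]
        cases B with
        | nil => rfl
        | cons b B' =>
          simp [PySem.List.insertBy, hB b (List.mem_cons_self ..)]
      rw [hts, htsplit, hAB]
      simp only [List.flatMap_append, List.flatMap_cons]
      have hgA : A.flatMap (pvGroup (l ++ [x])) = A.flatMap (pvGroup l) :=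
        List.flatMap_congr (fun a ha => by
          rw [hgroup a]
          simp [show (x.1 == a) = false by simp [(hA a ha).ne']])
      have hgB : B.flatMap (pvGroup (l ++ [x])) = B.flatMap (pvGroup l) :=
        List.flatMap_congr (fun b hb => by
          rw [hgroup b]
          simp [show (x.1 == b) = false by simp [(hB b hb).ne]])
      rw [hgA, hgB, hgt0]
      have hfalse : ∀ c ∈ A.flatMap (pvGroup l),
          (fun (a b : Int × String × String) => decide (a.1 < b.1)) x c = false := by
        intro c hc
        obtain ⟨a, ha, hcg⟩ := List.mem_flatMap.1 hc
        have hfst := pv_group_fst hcg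
        simp [hfst, not_lt.2 (le_of_lt (hA a ha))]
      rw [pv_insertBy_append _ x _ _ hfalse]
      cases B with
      | nil => simp [PySem.List.insertBy]
      | cons b B' =>
        have hbmem : b ∈ l.map (fun c => c.1) :=
          pv_mem_pvTs.1 (by rw [hAB]; exact List.mem_append.2 (Or.inr (List.mem_cons_self ..)))
        rcases hGb : pvGroup l b with _ | ⟨c0, G'⟩
        · exact absurd hGb (pv_group_ne_nil hbmem)
        · have hc0 : c0.1 = b := pv_group_fst (by rw [hGb]; exact List.mem_cons_self ..)
          have hx1b : (decide (x.1 < c0.1)) = true := by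
            simp [hc0]
            exact hB b (List.mem_cons_self ..)
          simp only [List.flatMap_cons, hGb, List.cons_append]
          simp [PySem.List.insertBy, hx1b]


-- ---- B's single pass over the grouped list ----

-- within one group no row is flushed
theorem pv_run_group (t : Int) :
    ∀ (G : List (Int × String × String)), (∀ c ∈ G, c.1 = t) →
    ∀ (cv : PySem.Dict String String) (rows : List (Int × List (String × String))),
      G.foldl pvStep (cv, some t, rows) = (G.foldl pvIns cv, some t, rows) := by
  intro G
  induction G with
  | nil => intro _ cv rows; rfl
  | cons c G ih =>
    intro h cv rows
    have hc : c.1 = t := h c (List.mem_cons_self ..)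
    simp only [List.foldl_cons, pvStep, hc, ne_eq, not_true_eq_false, if_false]
    exact ih (fun x hx => h x (List.mem_cons_of_mem _ hx)) _ _

-- running B over the remaining groups flushes exactly A's rows
theorem pv_run_groups (changes : List (Int × String × String)) :
    ∀ (ts : List Int), ts.Pairwise (· < ·) → (∀ t ∈ ts, t ∈ changes.map (fun c => c.1)) →
    ∀ (p : Int) (cv : PySem.Dict String String) (rows : List (Int × List (String × String))),
      (∀ t ∈ ts, p < t) →
      pvFinish ((ts.flatMap (pvGroup changes)).foldl pvStep (cv, some p, rows))
        = rows ++ (p, cv.items) :: pvARows changes cv ts := by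
  intro ts
  induction ts with
  | nil => intro _ _ p cv rows _; simp [pvFinish, pvARows]
  | cons t r ih =>
    intro hp hmem p cv rows hlt
    have hne := pv_group_ne_nil (changes := changes) (hmem t (List.mem_cons_self ..))
    rcases hG : pvGroup changes t with _ | ⟨c0, G'⟩
    · exact absurd hG hne
    · have hc0 : c0.1 = t := pv_group_fst (by rw [hG]; exact List.mem_cons_self ..)
      have hG' : ∀ c ∈ G', c.1 = t := fun c hc =>
        pv_group_fst (by rw [hG]; exact List.mem_cons_of_mem _ hc)
      have htp : t ≠ p := (hlt t (List.mem_cons_self ..)).ne'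
      simp only [List.flatMap_cons, List.foldl_append, hG, List.foldl_cons]
      have hstep : pvStep (cv, some p, rows) c0 = (pvIns cv c0, some t, rows ++ [(p, cv.items)]) := by
        simp [pvStep, pvIns, hc0, htp]
      rw [hstep, pv_run_group t G' hG']
      have hfold : G'.foldl pvIns (pvIns cv c0) = (pvGroup changes t).foldl pvIns cv := by
        rw [hG]; rfl
      rw [hfold]
      rw [ih (List.pairwise_cons.1 hp).2 (fun x hx => hmem x (List.mem_cons_of_mem _ hx)) t _ _
          (fun x hx => (List.pairwise_cons.1 hp).1 x hx)]
      simp [pvARows, hG]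


-- bridge: A's whole computation from init equals B's whole computation from init
theorem pv_AB (changes : List (Int × String × String)) (init : PySem.Dict String String) :
    ((pvTs changes).foldl
        (fun (st : PySem.Dict String String × List (Int × List (String × String))) t =>
          let cv := if (changes.foldl (fun bt c => bt.modify c.1 PySem.Dict.empty (fun d => d.insert c.2.1 c.2.2)) PySem.Dict.empty).contains t
                    then st.1.update ((changes.foldl (fun bt c => bt.modify c.1 PySem.Dict.empty (fun d => d.insert c.2.1 c.2.2)) PySem.Dict.empty).getD t PySem.Dict.empty).items
                    else st.1
          (cv, st.2 ++ [(t, cv.items)])) (init, [])).2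
      = pvFinish ((PySem.List.sorted changes (fun c => c.1) false).foldl pvStep (init, none, [])) := by
  rw [pv_grouped changes,
      pv_A_rows changes (pvTs changes) (fun t ht => pv_mem_pvTs.1 ht) init []]
  have hpw : (pvTs changes).Pairwise (· < ·) :=
    PySem.List.sorted_ofList_pairwise_lt (changes.map (fun c => c.1))
  rcases h : pvTs changes with _ | ⟨t1, r⟩
  · simp [pvARows, pvFinish]
  · rw [h] at hpw
    have hmem : ∀ t ∈ t1 :: r, t ∈ changes.map (fun c => c.1) := by
      intro t ht; exact pv_mem_pvTs.1 (h ▸ ht)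
    have hne := pv_group_ne_nil (changes := changes) (hmem t1 (List.mem_cons_self ..))
    rcases hG : pvGroup changes t1 with _ | ⟨c0, G'⟩
    · exact absurd hG hne
    · have hc0 : c0.1 = t1 := pv_group_fst (by rw [hG]; exact List.mem_cons_self ..)
      have hG' : ∀ c ∈ G', c.1 = t1 := fun c hc =>
        pv_group_fst (by rw [hG]; exact List.mem_cons_of_mem _ hc)
      simp only [List.flatMap_cons, List.foldl_append, hG, List.foldl_cons]
      have hstep : pvStep (init, none, []) c0 = (pvIns init c0, some t1, []) := by
        simp [pvStep, pvIns, hc0]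
      rw [hstep, pv_run_group t1 G' hG']
      have hfold : G'.foldl pvIns (pvIns init c0) = (pvGroup changes t1).foldl pvIns init := by
        rw [hG]; rfl
      rw [hfold]
      rw [pv_run_groups changes r (List.pairwise_cons.1 hpw).2
          (fun x hx => hmem x (List.mem_cons_of_mem _ hx)) t1 _ []
          (fun x hx => (List.pairwise_cons.1 hpw).1 x hx)]
      simp [pvARows]

-- ===== VERDICT (by name: the statement is the Claim_ definition above) =====
theorem build_timeline_spec : Claim_equal_build_timeline := by
  intro signals changes _
  unfold Spec_build_timeline build_timeline build_timeline_alt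
  exact pv_AB changes (signals.foldl (fun d p => d.insert p.1 "0") PySem.Dict.empty)
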